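-- pv_equiv track=rewrite | github.com/AmrSheta22/meshwarc | meshwarc_utils.py | tfidf_data_prep
-- ===== SOURCE A (Python) =====
-- def tfidf_data_prep(lemmatized_paragraphs, en_flag):
--     tfidf_data = []
--     count = 0
--     for i in en_flag:
--         if i:
--             tfidf_data.append(lemmatized_paragraphs[count])
--             count += 1
--         else:
--             tfidf_data.append("\n")
--     return tfidf_data
-- ===== SOURCE B (Python) =====
-- def tfidf_data_prep(lemmatized_paragraphs, en_flag):
--     # run-length encode the stretches of falsy flags preceding each truthy flag
--     gaps = []
--     run = 0
--     for f in en_flag: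
--         if f:
--             gaps.append(run)
--             run = 0
--         else:
--             run += 1
--     # emit a newline block then the k-th paragraph per gap, plus the trailing block
--     out = []
--     for k, g in enumerate(gaps):
--         out.extend(["\n"] * g)
--         out.append(lemmatized_paragraphs[k])
--     out.extend(["\n"] * run)
--     return out
-- ===== Notes on version B (the rewrite author's own statement) =====
-- stated objective: alternative
-- what changed: B run-length encodes the falsy-flag gaps between truthy flags into a list of gap sizes, then emits the output block-wise (a newline block followed by the k-th paragraph per gap, plus the trailing block), instead of A's per-flag branch with a running counter.
import Mathlib
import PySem

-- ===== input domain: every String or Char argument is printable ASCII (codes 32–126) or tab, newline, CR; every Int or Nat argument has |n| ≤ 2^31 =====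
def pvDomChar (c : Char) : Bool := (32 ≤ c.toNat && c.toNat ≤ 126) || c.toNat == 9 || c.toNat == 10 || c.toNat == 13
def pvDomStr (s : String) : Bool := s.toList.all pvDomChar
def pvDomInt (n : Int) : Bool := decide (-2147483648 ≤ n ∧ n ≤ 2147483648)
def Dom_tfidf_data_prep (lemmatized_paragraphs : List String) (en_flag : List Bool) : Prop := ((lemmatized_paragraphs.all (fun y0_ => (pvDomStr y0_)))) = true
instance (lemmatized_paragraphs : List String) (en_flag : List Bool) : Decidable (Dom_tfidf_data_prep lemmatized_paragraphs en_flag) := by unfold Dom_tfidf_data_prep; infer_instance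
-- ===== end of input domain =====

-- B run-length encodes the falsy-flag gaps, then emits the output block-wise (newline block +
-- k-th paragraph per gap, plus a trailing block) instead of A's counter-driven per-flag loop.

-- ===== PORT A =====
-- loop 'for i in en_flag' with the shared counter 'count'; lemmatized_paragraphs[count]
-- raises IndexError when count is out of range — those inputs are excluded by Pre_ below,
-- so the .getD "" default is never reached on admitted inputs.
def tfidfGoA (ps : List String) : List Bool → Nat → List String
  | [], _ => []
  | f :: fs, count =>
      if f then ((PySem.List.pyGet? ps (count : Int)).getD "") :: tfidfGoA ps fs (count + 1)
      else "\n" :: tfidfGoA ps fs count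

def tfidf_data_prep (lemmatized_paragraphs : List String) (en_flag : List Bool) : List String :=
  tfidfGoA lemmatized_paragraphs en_flag 0

-- ===== PORT B =====
-- Source B: first loop folds en_flag into (gaps, run); second loop 'for k, g in enumerate(gaps)'
-- extends with ["\n"]*g then appends lemmatized_paragraphs[k] (IndexError exactly on the
-- inputs Pre_ excludes, so .getD "" is never reached on admitted inputs); then ["\n"]*run.
def tfidf_data_prep_alt (lemmatized_paragraphs : List String) (en_flag : List Bool) : List String :=
  let gr := en_flag.foldl (fun s f => if f then (s.1 ++ [s.2], 0) else (s.1, s.2 + 1)) (([] : List Nat), 0)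
  let out := gr.1.zipIdx.foldl
    (fun out p => out ++ List.replicate p.1 "\n" ++ [(PySem.List.pyGet? lemmatized_paragraphs (p.2 : Int)).getD ""])
    ([] : List String)
  out ++ List.replicate gr.2 "\n"

-- ===== PRECONDITION & SPEC =====
-- Both Pythons raise IndexError when en_flag holds more True entries than there are
-- paragraphs; Pre_ excludes exactly those inputs.
def Pre_tfidf_data_prep (lemmatized_paragraphs : List String) (en_flag : List Bool) : Prop :=
  en_flag.count true ≤ lemmatized_paragraphs.length
instance (lemmatized_paragraphs : List String) (en_flag : List Bool) : Decidable (Pre_tfidf_data_prep lemmatized_paragraphs en_flag) := by unfold Pre_tfidf_data_prep; infer_instance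

def pvWitness_tfidf_data_prep : List String × List Bool := (["alpha", "beta"], [true, false, true])

def Spec_tfidf_data_prep (lemmatized_paragraphs : List String) (en_flag : List Bool) (out : List String) : Prop := out = tfidf_data_prep_alt lemmatized_paragraphs en_flag
instance (lemmatized_paragraphs : List String) (en_flag : List Bool) (out : List String) : Decidable (Spec_tfidf_data_prep lemmatized_paragraphs en_flag out) := by unfold Spec_tfidf_data_prep; infer_instance

-- ===== CLAIM =====
def Claim_equal_tfidf_data_prep : Prop := ∀ (lemmatized_paragraphs : List String) (en_flag : List Bool), Dom_tfidf_data_prep lemmatized_paragraphs en_flag → Pre_tfidf_data_prep lemmatized_paragraphs en_flag → Spec_tfidf_data_prep lemmatized_paragraphs en_flag (tfidf_data_prep lemmatized_paragraphs en_flag)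

-- ===== LEMMAS AND PROOFS =====

-- Python indexing shifts down one step past a cons cell (and stays none on []).
theorem pvGet_succ_tail (l : List String) (n : Nat) :
    PySem.List.pyGet? l ((n : Int) + 1) = PySem.List.pyGet? l.tail (n : Int) := by
  cases l with
  | nil => simp [PySem.List.pyGet?, PySem.List.pyIdx?]
  | cons a t =>
    simp only [PySem.List.pyGet?, PySem.List.pyIdx?, List.tail_cons]
    split_ifs <;> simp_all <;> omega

-- A's loop started at count+1 equals the loop on the tail of the paragraph list started at count.
theorem tfidfGoA_succ (ps : List String) (fs : List Bool) (c : Nat) :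
    tfidfGoA ps fs (c + 1) = tfidfGoA ps.tail fs c := by
  induction fs generalizing c with
  | nil => rfl
  | cons f fs ih =>
    simp only [tfidfGoA]
    have := pvGet_succ_tail ps c
    split_ifs <;> simp [ih, Nat.cast_add, Nat.cast_one, this]

-- recursive characterisation of B's first loop, with the running False-count as argument
def gapsRec : List Bool → Nat → List Nat × Nat
  | [], r => ([], r)
  | true :: fs, r => ((gapsRec fs 0).1.cons r, (gapsRec fs 0).2)
  | false :: fs, r => gapsRec fs (r + 1)

theorem foldl_gaps (fs : List Bool) (gs : List Nat) (r : Nat) :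
    fs.foldl (fun s f => if f then (s.1 ++ [s.2], 0) else (s.1, s.2 + 1)) (gs, r)
      = (gs ++ (gapsRec fs r).1, (gapsRec fs r).2) := by
  induction fs generalizing gs r with
  | nil => simp [gapsRec]
  | cons f fs ih =>
    cases f <;> simp [gapsRec, List.foldl_cons, ih]

-- the block-wise emitter as a function of the gap list, a tail gap and the paragraph list
def emit (ps : List String) (run : Nat) : List Nat → List String
  | [] => List.replicate run "\n"
  | g :: gs => List.replicate g "\n" ++ ((PySem.List.pyGet? ps (0 : Int)).getD "") :: emit ps.tail run gs

-- B's second fold (over zipIdx, with base index n and paragraphs dropped accordingly) = emit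
theorem flatMap_emit (gs : List Nat) (ps : List String) (run : Nat) :
    (gs.zipIdx.flatMap fun p => List.replicate p.1 "\n" ++ [(PySem.List.pyGet? ps (p.2 : Int)).getD ""])
      ++ List.replicate run "\n" = emit ps run gs := by
  induction gs generalizing ps with
  | nil => simp [emit]
  | cons g gs ih =>
    rw [List.zipIdx_cons, List.zipIdx_succ]
    simp only [List.flatMap_cons, List.flatMap_map, emit]
    have h : (fun a : Nat × Nat => List.replicate a.1 "\n" ++ [(PySem.List.pyGet? ps ((a.2 + 1 : Nat) : Int)).getD ""])
        = fun a : Nat × Nat => List.replicate a.1 "\n" ++ [(PySem.List.pyGet? ps.tail ((a.2 : Nat) : Int)).getD ""] := by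
      funext a
      rw [show ((a.2 + 1 : Nat) : Int) = ((a.2 : Nat) : Int) + 1 by push_cast; ring, pvGet_succ_tail]
    rw [List.append_assoc, List.append_assoc, h, ih]
    simp

-- key invariant: r pending newlines followed by A's loop = emit applied to gapsRec
theorem emit_gapsRec (fs : List Bool) (ps : List String) (r : Nat) :
    List.replicate r "\n" ++ tfidfGoA ps fs 0 = emit ps (gapsRec fs r).2 (gapsRec fs r).1 := by
  induction fs generalizing ps r with
  | nil => simp [gapsRec, emit, tfidfGoA]
  | cons f fs ih =>
    cases f with
    | false =>
      have : List.replicate (r + 1) "\n" ++ tfidfGoA ps fs 0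
          = List.replicate r "\n" ++ tfidfGoA ps (false :: fs) 0 := by
        simp [tfidfGoA, List.replicate_succ', List.append_assoc]
      rw [gapsRec, ← ih ps (r + 1), this]
    | true =>
      simp only [gapsRec, emit, tfidfGoA, if_true]
      have h1 : tfidfGoA ps fs (0 + 1) = tfidfGoA ps.tail fs 0 := tfidfGoA_succ ps fs 0
      have h2 := ih ps.tail 0
      simp only [List.replicate_zero, List.nil_append] at h2
      simp [h1, h2]

-- ===== VERDICT =====
theorem tfidf_data_prep_spec : Claim_equal_tfidf_data_prep := by
  intro ps fs _ _
  unfold Spec_tfidf_data_prep tfidf_data_prep tfidf_data_prep_alt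
  simp only [foldl_gaps fs [] 0, List.nil_append, List.append_assoc]
  rw [PySem.List.foldl_append_eq_flatMap, List.nil_append, flatMap_emit, ← emit_gapsRec fs ps 0]
  simp
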